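-- pv_equiv track=rewrite | github.com/trandafile/maic-pcb | views/view_editor.py | _find_best_material_index
-- ===== SOURCE A (Python) =====
-- def _find_best_material_index(options, current_value):
--     if not options:
--         return None
--
--     current_value = str(current_value or "")
--     for idx, option in enumerate(options):
--         if option == current_value:
--             return idx
--
--     for idx, option in enumerate(options):
--         if current_value and current_value in option:
--             return idx
--
--     return 0
-- ===== SOURCE B (Python) =====
-- def _find_best_material_index(options, current_value):
--     if not options:
--         return None
--     current_value = str(current_value or "")
--     best_substring = None
--     for idx, option in enumerate(options):
--         if option == current_value:
--             return idx
--         if best_substring is None and current_value and current_value in option: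
--             best_substring = idx
--     return best_substring if best_substring is not None else 0
-- ===== Notes on version B (the rewrite author's own statement) =====
-- stated objective: alternative
-- what changed: Merged A's two sequential enumerate scans into a single pass that returns on an exact match and remembers the first substring match in an accumulator.
import Mathlib
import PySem

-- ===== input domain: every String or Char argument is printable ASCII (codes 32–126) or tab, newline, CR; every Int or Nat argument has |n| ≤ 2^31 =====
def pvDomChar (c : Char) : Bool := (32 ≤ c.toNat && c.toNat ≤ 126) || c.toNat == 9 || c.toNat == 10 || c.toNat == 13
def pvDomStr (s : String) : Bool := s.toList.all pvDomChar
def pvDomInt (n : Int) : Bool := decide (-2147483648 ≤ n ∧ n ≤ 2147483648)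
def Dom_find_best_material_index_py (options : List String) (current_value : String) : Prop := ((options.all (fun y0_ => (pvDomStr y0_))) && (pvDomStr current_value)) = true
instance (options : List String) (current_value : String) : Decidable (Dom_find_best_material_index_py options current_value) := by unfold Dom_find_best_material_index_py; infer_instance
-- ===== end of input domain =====

-- B merges A's two sequential scans over options into one pass that remembers the
-- first substring match while still returning immediately on an exact match; same asymptotic cost, single-pass decomposition.


-- ===== PORT A =====
-- first for-loop: 'for idx, option in enumerate(options): if option == current_value: return idx'
def pyExactScan (options : List String) (cv : String) (idx : Int) : Option Int :=
  match options with
  | [] => none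
  | o :: rest => if o = cv then some idx else pyExactScan rest cv (idx + 1)

-- second for-loop: 'if current_value and current_value in option: return idx'
def pySubScan (options : List String) (cv : String) (idx : Int) : Option Int :=
  match options with
  | [] => none
  | o :: rest =>
    if cv ≠ "" ∧ PySem.Str.isIn cv o = true then some idx else pySubScan rest cv (idx + 1)

-- 'current_value = str(current_value or "")' is the identity on a string argument
-- (it returns "" iff current_value is already ""), so it is not re-stated here.
def find_best_material_index_py (options : List String) (current_value : String) : Option Int :=
  if options = [] then none
  else
    match pyExactScan options current_value 0 with
    | some i => some i
    | none =>
      match pySubScan options current_value 0 with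
      | some i => some i
      | none => some 0

-- ===== PORT B =====
-- single pass of Source B: return idx on exact match, remember first substring match in best
def altScan (options : List String) (cv : String) (idx : Int) (best : Option Int) : Int :=
  match options with
  | [] => match best with | some b => b | none => 0
  | o :: rest =>
    if o = cv then idx
    else
      altScan rest cv (idx + 1)
        (if best = none ∧ cv ≠ "" ∧ PySem.Str.isIn cv o = true then some idx else best)

def find_best_material_index_py_alt (options : List String) (current_value : String) : Option Int :=
  if options = [] then none
  else some (altScan options current_value 0 none)

-- ===== PRECONDITION & SPEC =====
def Spec_find_best_material_index_py (options : List String) (current_value : String) (out : Option Int) : Prop := out = find_best_material_index_py_alt options current_value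
instance (options : List String) (current_value : String) (out : Option Int) : Decidable (Spec_find_best_material_index_py options current_value out) := by unfold Spec_find_best_material_index_py; infer_instance

-- ===== CLAIM (what is proved, stated in full; the proofs are below) =====
def Claim_equal_find_best_material_index_py : Prop := ∀ (options : List String) (current_value : String), Dom_find_best_material_index_py options current_value → Spec_find_best_material_index_py options current_value (find_best_material_index_py options current_value)

-- ===== LEMMAS AND PROOFS =====
-- Loop invariant of B's single pass: it equals the exact-scan result, falling back to the
-- carried best index, falling back to the substring-scan result, falling back to 0.
theorem altScan_eq (options : List String) (cv : String) :
    ∀ (idx : Int) (best : Option Int),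
      altScan options cv idx best =
        match pyExactScan options cv idx with
        | some i => i
        | none =>
          match best with
          | some b => b
          | none => match pySubScan options cv idx with | some i => i | none => 0 := by
  induction options with
  | nil => intro idx best; simp [altScan, pyExactScan, pySubScan]
  | cons o rest ih =>
    intro idx best
    by_cases he : o = cv
    · simp [altScan, pyExactScan, he]
    · by_cases hs : cv ≠ "" ∧ PySem.Str.isIn cv o = true
      · cases best with
        | none =>
          simp only [altScan, pyExactScan, pySubScan, if_neg he, ih, hs]
          cases pyExactScan rest cv (idx + 1) with
          | some i => simp
          | none => simp [hs.1]
        | some b => simp [altScan, pyExactScan, he, hs, ih]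
      · cases best with
        | none =>
          simp only [altScan, pyExactScan, pySubScan, if_neg he, ih, if_neg hs]
          cases pyExactScan rest cv (idx + 1) with
          | some i => simp
          | none =>
            by_cases hcv : cv = ""
            · simp [hcv]
            · have hf : PySem.Str.isIn cv o = false := by
                cases h' : PySem.Str.isIn cv o
                · rfl
                · exact absurd ⟨hcv, h'⟩ hs
              simp only [PySem.Str.isIn] at hf
              simp [hcv, hf]
        | some b => simp [altScan, pyExactScan, he, ih]

-- ===== VERDICT (by name: the statement is the Claim_ definition above) =====
theorem find_best_material_index_py_spec : Claim_equal_find_best_material_index_py := by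
  intro options cv _
  unfold Spec_find_best_material_index_py find_best_material_index_py find_best_material_index_py_alt
  by_cases h : options = []
  · simp [h]
  · simp only [h, altScan_eq]
    cases pyExactScan options cv 0 <;> simp
    cases pySubScan options cv 0 <;> simp
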